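-- pv_equiv track=rewrite | github.com/madhan-karthikeyan/ApexS_SWE | tawos/build_tawos_apex_dataset.py | unescape_mysql_string
-- ===== SOURCE A (Python) =====
-- def unescape_mysql_string(value: str) -> str:
--     result: list[str] = []
--     index = 0
--     mapping = {
--         "0": "\0",
--         "b": "\b",
--         "n": "\n",
--         "r": "\r",
--         "t": "\t",
--         "Z": "\x1a",
--         "'": "'",
--         '"': '"',
--         "\\": "\\",
--     }
--     while index < len(value):
--         char = value[index]
--         if char != "\\" or index + 1 >= len(value):
--             result.append(char)
--             index += 1
--             continue
--         index += 1
--         escaped = value[index]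
--         result.append(mapping.get(escaped, escaped))
--         index += 1
--     return "".join(result)
-- ===== SOURCE B (Python) =====
-- import re
--
-- _MAPPING = {
--     "0": "\0",
--     "b": "\b",
--     "n": "\n",
--     "r": "\r",
--     "t": "\t",
--     "Z": "\x1a",
--     "'": "'",
--     '"': '"',
--     "\\": "\\",
-- }
--
--
-- def unescape_mysql_string(value: str) -> str:
--     return re.sub(
--         r"\\(.)",
--         lambda m: _MAPPING.get(m.group(1), m.group(1)),
--         value,
--         flags=re.DOTALL,
--     )
-- ===== Notes on version B (the rewrite author's own statement) =====
-- stated objective: idiomatic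
-- what changed: Replaced the hand-written index/while scan with character appends by a single re.sub over the pattern \\(.) with DOTALL, whose replacement looks the escaped character up in the same mapping; the regex engine does the non-overlapping left-to-right scan.
import Mathlib
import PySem

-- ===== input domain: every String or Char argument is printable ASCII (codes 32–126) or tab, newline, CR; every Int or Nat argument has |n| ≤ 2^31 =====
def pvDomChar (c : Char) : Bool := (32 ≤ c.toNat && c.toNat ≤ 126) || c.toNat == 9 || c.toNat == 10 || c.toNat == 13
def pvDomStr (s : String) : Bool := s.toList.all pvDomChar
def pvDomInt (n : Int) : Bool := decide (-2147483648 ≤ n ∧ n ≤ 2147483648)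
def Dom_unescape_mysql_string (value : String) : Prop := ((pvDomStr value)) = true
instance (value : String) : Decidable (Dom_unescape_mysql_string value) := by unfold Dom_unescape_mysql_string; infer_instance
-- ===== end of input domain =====

-- B replaces A's hand-written index/while scan by a single regex substitution (re.sub of "\\(.)" with DOTALL); same mapping, same result — idiomatic, not faster.


-- ===== PORT A =====
-- the escape mapping (Python dict str→str of single characters; ported as Char→Char)
def pvEscMap : PySem.Dict Char Char := PySem.Dict.ofList
  [('0', '\x00'), ('b', '\x08'), ('n', '\n'), ('r', '\x0D'), ('t', '\t'),
   ('Z', '\x1A'), ('\'', '\''), ('"', '"'), ('\\', '\\')]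

-- A's while loop over the index, appending to `result`
def pvLoopA (cs : List Char) (i : Nat) (acc : List Char) : List Char :=
  if h : i < cs.length then
    let c := cs[i]
    if c ≠ '\\' ∨ i + 1 ≥ cs.length then
      pvLoopA cs (i + 1) (acc ++ [c])
    else
      -- index += 1; escaped = value[index]; append mapping.get(escaped, escaped); index += 1
      let e := cs[i + 1]!
      pvLoopA cs (i + 2) (acc ++ [pvEscMap.getD e e])
  else acc
termination_by cs.length - i

def unescape_mysql_string (value : String) : String :=
  String.ofList (pvLoopA value.toList 0 [])

-- ===== PORT B =====
-- re.sub(r'\\(.)', repl, value, DOTALL): non-overlapping left-to-right scan; each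
-- match is a backslash plus any one character, replaced via the mapping (default:
-- the character itself); a trailing lone backslash has no following char, stays.
def pvScanB : List Char → List Char
  | '\\' :: c :: rest => pvEscMap.getD c c :: pvScanB rest
  | c :: rest => c :: pvScanB rest
  | [] => []

def unescape_mysql_string_alt (value : String) : String :=
  String.ofList (pvScanB value.toList)

-- ===== PRECONDITION & SPEC =====
def Spec_unescape_mysql_string (value : String) (out : String) : Prop := out = unescape_mysql_string_alt value
instance (value : String) (out : String) : Decidable (Spec_unescape_mysql_string value out) := by unfold Spec_unescape_mysql_string; infer_instance

-- ===== CLAIM (what is proved, stated in full; the proofs are below) =====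
def Claim_equal_unescape_mysql_string : Prop := ∀ (value : String), Dom_unescape_mysql_string value → Spec_unescape_mysql_string value (unescape_mysql_string value)

-- ===== LEMMAS AND PROOFS =====
theorem pvScanB_cons_ne (c : Char) (rest : List Char) (h : c ≠ '\\') :
    pvScanB (c :: rest) = c :: pvScanB rest := by
  cases rest <;> simp [pvScanB, h]

theorem pvScanB_cons_esc (c : Char) (rest : List Char) :
    pvScanB ('\\' :: c :: rest) = pvEscMap.getD c c :: pvScanB rest := rfl

theorem pvLoopA_eq (cs : List Char) (i : Nat) (acc : List Char) :
    pvLoopA cs i acc = acc ++ pvScanB (cs.drop i) := by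
  induction i, acc using pvLoopA.induct cs with
  | case1 i acc h c hcond ih =>
      have hc : c = cs[i] := rfl
      rw [hc] at hcond
      rw [pvLoopA]
      simp only [dif_pos h]
      rw [if_pos hcond, ih]
      have hdrop : cs.drop i = cs[i] :: cs.drop (i + 1) := List.drop_eq_getElem_cons h
      rcases hcond with hne | hlen
      · rw [hdrop, pvScanB_cons_ne _ _ hne, List.append_assoc]; rfl
      · have hnil : cs.drop (i + 1) = [] := List.drop_eq_nil_of_le hlen
        rw [hdrop, hnil]
        by_cases hb : cs[i] = '\\'
        · rw [hb]; simp [pvScanB, hc, hb]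
        · rw [pvScanB_cons_ne _ _ hb]; simp [pvScanB, hc]
  | case2 i acc h c hcond e ih =>
      have hc : c = cs[i] := rfl
      rw [hc] at hcond
      rw [pvLoopA]
      simp only [dif_pos h]
      rw [if_neg hcond, ih]
      have hb : cs[i] = '\\' := by
        by_contra hn; exact hcond (Or.inl hn)
      have hlt : i + 1 < cs.length := by
        by_contra hn; exact hcond (Or.inr (by omega))
      have hgd : cs[i + 1]! = cs[i + 1] := getElem!_pos cs (i + 1) hlt
      have hdrop : cs.drop i = cs[i] :: cs.drop (i + 1) := List.drop_eq_getElem_cons h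
      have hdrop2 : cs.drop (i + 1) = cs[i + 1] :: cs.drop (i + 2) := List.drop_eq_getElem_cons hlt
      have he : e = cs[i + 1] := hgd
      rw [hdrop, hdrop2, hb, he, pvScanB_cons_esc, List.append_assoc]
      rfl
  | case3 i acc h =>
      rw [pvLoopA]
      have hnil : cs.drop i = [] := List.drop_eq_nil_of_le (by omega)
      simp [h, hnil, pvScanB]

-- ===== VERDICT (by name: the statement is the Claim_ definition above) =====
theorem unescape_mysql_string_spec : Claim_equal_unescape_mysql_string := by
  intro value _
  show _ = _
  unfold unescape_mysql_string unescape_mysql_string_alt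
  rw [pvLoopA_eq]
  rfl
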